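-- pv_equiv track=rewrite | github.com/diyaraj2028-code/chicago-airbnb-data | report.py | count_multi_listings
-- ===== SOURCE A (Python) =====
-- INDEX_HOST_ID = 2
--
-- def count_multi_listings(data: list[list[str]]) -> int:
--     """Counts the total number of listings made by hosts with multiple listings
--
--     A host has multiple listings if they have posted at least 2 listings
--     A host is uniquely identified by their HOST ID
--
--     Refer to the "Listings Per Hosts" section on https://Inside Airbnb.com/chicago/
--     To compare your result with Inside Airbnb, we are calculating
--       what is referred to as the number of multi-listings
--
--     Arguments:
--       data: an Inside Airbnb dataset
--
--     Returns:
--       the total number of "multiple listings"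
--     """
--
--     res = 0
--     host_listings = {}
--     for host in data:
--         host_id = host[INDEX_HOST_ID]
--         if (host_id not in host_listings):
--             host_id_count = 1
--             host_listings.update([(host_id, host_id_count)])
--         elif (host_id in host_listings):
--             host_listings[host_id] += 1
--     for key in host_listings:
--         if host_listings[key] > 1:
--             res = res + host_listings[key]
--     return res
-- ===== SOURCE B (Python) =====
-- INDEX_HOST_ID = 2
--
-- def count_multi_listings(data: list[list[str]]) -> int:
--     """Counts listings of hosts with multiple listings: build the per-host
--     frequency map in one pass, then re-scan the rows counting those whose
--     host has more than one listing."""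
--     counts = {}
--     for row in data:
--         host_id = row[INDEX_HOST_ID]
--         counts[host_id] = counts.get(host_id, 0) + 1
--     res = 0
--     for row in data:
--         if counts[row[INDEX_HOST_ID]] > 1:
--             res += 1
--     return res
-- ===== Notes on version B (the rewrite author's own statement) =====
-- stated objective: alternative
-- what changed: Instead of summing the multi-hosts' counts from the frequency map, B re-scans the data a second time and counts the rows whose host has frequency greater than 1 (the same value, since each such row contributes 1 to some multi-host's count).
import Mathlib
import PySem

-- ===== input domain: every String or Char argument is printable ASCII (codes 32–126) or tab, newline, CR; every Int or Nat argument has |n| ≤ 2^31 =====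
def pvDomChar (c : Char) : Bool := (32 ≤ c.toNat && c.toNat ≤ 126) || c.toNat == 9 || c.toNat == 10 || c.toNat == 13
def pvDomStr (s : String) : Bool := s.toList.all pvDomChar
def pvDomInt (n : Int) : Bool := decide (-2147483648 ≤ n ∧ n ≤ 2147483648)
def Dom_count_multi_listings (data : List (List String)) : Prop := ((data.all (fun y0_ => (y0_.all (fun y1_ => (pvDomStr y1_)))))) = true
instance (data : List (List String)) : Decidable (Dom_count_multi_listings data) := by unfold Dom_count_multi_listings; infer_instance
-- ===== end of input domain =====

-- B builds the same per-host frequency map but then re-scans the rows, counting those whose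
-- host has more than one listing, instead of summing the multi-hosts' counts (objective: alternative).

-- ===== PORT A =====
def count_multi_listings (data : List (List String)) : Int :=
  let host_listings : PySem.Dict String Int := data.foldl
    (fun d host =>
      let host_id := PySem.List.pyGetD host 2 ""
      if d.contains host_id = false then d.insert host_id 1
      else if d.contains host_id = true then d.insert host_id (d.getD host_id 0 + 1)
      else d)
    PySem.Dict.empty
  host_listings.keys.foldl
    (fun res key => if host_listings.getD key 0 > 1 then res + host_listings.getD key 0 else res) 0

-- ===== PORT B =====
def count_multi_listings_alt (data : List (List String)) : Int :=
  let counts : PySem.Dict String Int := data.foldl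
    (fun d row => d.modify (PySem.List.pyGetD row 2 "") 0 (· + 1)) PySem.Dict.empty
  data.foldl
    (fun res row => if counts.getD (PySem.List.pyGetD row 2 "") 0 > 1 then res + 1 else res) 0

-- ===== PRECONDITION & SPEC =====
-- Pre_ excludes rows with fewer than 3 fields, on which the Python A raises IndexError.
def Pre_count_multi_listings (data : List (List String)) : Prop :=
  ∀ row ∈ data, 3 ≤ row.length
instance (data : List (List String)) : Decidable (Pre_count_multi_listings data) := by
  unfold Pre_count_multi_listings; infer_instance
def pvWitness_count_multi_listings : List (List String) :=
  [["a", "b", "h1"], ["c", "d", "h1"], ["e", "f", "h2"]]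
def Spec_count_multi_listings (data : List (List String)) (out : Int) : Prop := out = count_multi_listings_alt data
instance (data : List (List String)) (out : Int) : Decidable (Spec_count_multi_listings data out) := by unfold Spec_count_multi_listings; infer_instance

-- ===== CLAIM (what is proved, stated in full; the proofs are below) =====
def Claim_equal_count_multi_listings : Prop := ∀ (data : List (List String)), Dom_count_multi_listings data → Pre_count_multi_listings data → Spec_count_multi_listings data (count_multi_listings data)

-- ===== LEMMAS AND PROOFS =====

-- A's value: the sum, over the distinct hosts, of the counts greater than 1.
theorem count_multi_listings_eq_sum (data : List (List String)) :
    count_multi_listings data =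
      (((PySem.Set.ofList (data.map (fun row => PySem.List.pyGetD row 2 ""))).filter
          (fun k => decide ((1 : Int) < ((data.map (fun row => PySem.List.pyGetD row 2 "")).count k : Int)))).map
        (fun k => ((data.map (fun row => PySem.List.pyGetD row 2 "")).count k : Int))).sum := by
  simp only [count_multi_listings]
  have hd : data.foldl
      (fun (d : PySem.Dict String Int) host =>
        let host_id := PySem.List.pyGetD host 2 ""
        if d.contains host_id = false then d.insert host_id 1
        else if d.contains host_id = true then d.insert host_id (d.getD host_id 0 + 1)
        else d)
      PySem.Dict.empty
      = PySem.Dict.counter (data.map (fun row => PySem.List.pyGetD row 2 "")) := by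
    rw [← PySem.Dict.foldl_insert_getD_add_one_eq_counter, List.foldl_map]
    apply PySem.List.foldl_congr_mem
    intro d host _
    by_cases h : d.contains (PySem.List.pyGetD host 2 "") = true
    · simp [h]
    · have h' : d.contains (PySem.List.pyGetD host 2 "") = false := by
        cases hc : d.contains (PySem.List.pyGetD host 2 "") <;> simp_all
      simp [h', PySem.Dict.getD_of_not_contains d 0 h']
  rw [hd, PySem.Dict.keys_counter]
  simp only [PySem.Dict.getD_counter]
  rw [PySem.List.foldl_ite_eq_foldl_filter
        (p := fun k => (1:Int) < ((data.map (fun row => PySem.List.pyGetD row 2 "")).count k : Int))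
        (f := fun res k => res + ((data.map (fun row => PySem.List.pyGetD row 2 "")).count k : Int)),
      PySem.List.foldl_add]
  simp

-- B's value: the number of rows whose host occurs more than once.
theorem count_multi_listings_alt_eq_countP (data : List (List String)) :
    count_multi_listings_alt data =
      ((data.map (fun row => PySem.List.pyGetD row 2 "")).countP
        (fun k => decide ((1 : Int) < ((data.map (fun row => PySem.List.pyGetD row 2 "")).count k : Int))) : Int) := by
  simp only [count_multi_listings_alt]
  have hd : data.foldl
      (fun (d : PySem.Dict String Int) row => d.modify (PySem.List.pyGetD row 2 "") 0 (· + 1))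
      PySem.Dict.empty
      = PySem.Dict.counter (data.map (fun row => PySem.List.pyGetD row 2 "")) := by
    rw [PySem.Dict.counter_eq_foldl, List.foldl_map]
  rw [hd]
  simp only [PySem.Dict.getD_counter]
  rw [PySem.List.foldl_ite_add_one
        (p := fun row => (1:Int) < ((data.map (fun r => PySem.List.pyGetD r 2 "")).count (PySem.List.pyGetD row 2 "") : Int)),
      List.countP_map]
  rw [zero_add]
  rfl

-- the grouping identity: summing the multi-hosts' counts over the distinct hosts
-- counts exactly the rows whose host is a multi-host
theorem sum_ofList_filter_eq_countP (l : List String) (p : String → Bool) :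
    (((PySem.Set.ofList l).filter p).map (fun k => (l.count k : Int))).sum = (l.countP p : Int) := by
  have hperm : (PySem.Set.ofList l).Perm l.dedup := by
    rw [List.perm_ext_iff_of_nodup (PySem.Set.nodup_ofList l) l.nodup_dedup]
    intro a; simp [PySem.Set.mem_ofList, List.mem_dedup]
  rw [((hperm.filter p).map (fun k => (l.count k : Int))).sum_eq,
      ← List.sum_map_count_dedup_filter_eq_countP p l, Nat.cast_list_sum, List.map_map]
  rfl

-- ===== VERDICT (by name: the statement is the Claim_ definition above) =====
theorem count_multi_listings_spec : Claim_equal_count_multi_listings := by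
  intro data _ _
  unfold Spec_count_multi_listings
  rw [count_multi_listings_eq_sum, count_multi_listings_alt_eq_countP,
      sum_ofList_filter_eq_countP]
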